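-- pv_equiv track=rewrite | github.com/K1A2/algorithm_python | baekjoon/implementation/5373_큐빙.py | change_front
-- ===== SOURCE A (Python) =====
-- def rotate_90(data, dir):
--     for _ in range(3 if dir == 1 else 1):
--         new_data = [[0] * 3 for _ in range(3)]
--         for i in range(3):
--             for j in range(3):
--                 new_data[j][2 - i] = data[i][j]
--         data = new_data
--     return data
--
-- def change_front(up, down, front, left, right, dir):
--     for _ in range(3 if dir == '-' else 1):
--         front = rotate_90(front, 0)
--         save = up[2]
--         save, right[2] = right[2], save
--         save, down[2] = down[2], save
--         save, left[2] = left[2], save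
--         up[2] = save
--     return up, down, front, left, right
-- ===== SOURCE B (Python) =====
-- # Single-step version: one counter-clockwise turn replaces three clockwise ones.
-- # Mutates up/down/left/right in place (same as A); return-value equivalence is what is claimed.
-- def change_front(up, down, front, left, right, dir):
--     if dir == '-':
--         front = [[front[c][2 - r] for c in range(3)] for r in range(3)]
--         up[2], right[2], down[2], left[2] = right[2], down[2], left[2], up[2]
--     else:
--         front = [[front[2 - c][r] for c in range(3)] for r in range(3)]
--         up[2], right[2], down[2], left[2] = left[2], up[2], right[2], down[2]
--     return up, down, front, left, right
-- ===== Notes on version B (the rewrite author's own statement) =====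
-- stated objective: simpler
-- what changed: B drops both repeat loops: one direct counter-clockwise (resp. clockwise) index-formula rotation of the front face and a single 4-way simultaneous cycle of the [2] strips replace A's 1-or-3 iterations of (three-or-one nested-loop 90-degree rotations plus a chained save-swap sequence).
import Mathlib
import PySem

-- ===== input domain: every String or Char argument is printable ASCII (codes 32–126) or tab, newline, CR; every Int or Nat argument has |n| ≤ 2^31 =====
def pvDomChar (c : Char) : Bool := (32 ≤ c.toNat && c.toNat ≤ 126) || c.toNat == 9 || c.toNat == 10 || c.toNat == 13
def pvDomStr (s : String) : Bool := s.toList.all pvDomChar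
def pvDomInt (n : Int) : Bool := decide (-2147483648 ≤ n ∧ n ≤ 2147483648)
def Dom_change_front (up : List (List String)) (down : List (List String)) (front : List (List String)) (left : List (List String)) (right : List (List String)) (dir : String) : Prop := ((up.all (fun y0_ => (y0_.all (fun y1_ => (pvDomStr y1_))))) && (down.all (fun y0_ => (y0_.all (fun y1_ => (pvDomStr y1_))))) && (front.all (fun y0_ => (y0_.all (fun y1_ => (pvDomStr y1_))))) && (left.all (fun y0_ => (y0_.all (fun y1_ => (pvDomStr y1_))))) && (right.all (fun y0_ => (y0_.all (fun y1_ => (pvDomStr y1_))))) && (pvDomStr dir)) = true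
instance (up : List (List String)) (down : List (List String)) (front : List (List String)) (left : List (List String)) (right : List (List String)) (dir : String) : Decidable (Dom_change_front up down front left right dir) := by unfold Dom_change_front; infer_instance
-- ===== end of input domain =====

-- B replaces A's repeat-3-times loops by a single direct rotation and one simultaneous 4-way
-- strip cycle (simpler decomposition); equivalence is about the returned value (both Pythons
-- mutate the [2] rows of up/down/left/right in place in the same way).

-- ===== PORT A =====
-- Python's placeholder 0-filled new_data is modelled with "" cells; under Pre_change_front the
-- input has a full 3x3 front, so every placeholder cell is overwritten (as in the Python).
def rotate_90 (data : List (List String)) (dir : Int) : List (List String) :=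
  (List.range (if dir = 1 then 3 else 1)).foldl (fun data _ =>
    let new_data := List.replicate 3 (List.replicate 3 "")
    (List.range 3).foldl (fun nd i =>
      (List.range 3).foldl (fun nd j =>
        nd.set j ((nd.getD j []).set (2 - i) ((data.getD i []).getD j ""))) nd) new_data) data

def change_front (up : List (List String)) (down : List (List String)) (front : List (List String)) (left : List (List String)) (right : List (List String)) (dir : String) : List (List String) × List (List String) × List (List String) × List (List String) × List (List String) :=
  (List.range (if dir = "-" then 3 else 1)).foldl (fun s _ =>
    let (up, down, front, left, right) := s
    let front := rotate_90 front 0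
    let save := up.getD 2 []
    let (save, right) := (right.getD 2 [], right.set 2 save)
    let (save, down) := (down.getD 2 [], down.set 2 save)
    let (save, left) := (left.getD 2 [], left.set 2 save)
    let up := up.set 2 save
    (up, down, front, left, right)) (up, down, front, left, right)

-- ===== PORT B =====
def change_front_alt (up : List (List String)) (down : List (List String)) (front : List (List String)) (left : List (List String)) (right : List (List String)) (dir : String) : List (List String) × List (List String) × List (List String) × List (List String) × List (List String) :=
  if dir = "-" then
    let front' := (List.range 3).map (fun r => (List.range 3).map (fun c => (front.getD c []).getD (2 - r) ""))
    (up.set 2 (right.getD 2 []), down.set 2 (left.getD 2 []), front', left.set 2 (up.getD 2 []), right.set 2 (down.getD 2 []))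
  else
    let front' := (List.range 3).map (fun r => (List.range 3).map (fun c => (front.getD (2 - c) []).getD r ""))
    (up.set 2 (left.getD 2 []), down.set 2 (right.getD 2 []), front', left.set 2 (down.getD 2 []), right.set 2 (up.getD 2 []))

-- ===== PRECONDITION & SPEC =====
-- Pre_ is exactly where the Python A returns: each of up/down/left/right needs an index-2 row
-- and rotate_90 reads front[i][j] for all i,j < 3 (otherwise IndexError).
def Pre_change_front (up : List (List String)) (down : List (List String)) (front : List (List String)) (left : List (List String)) (right : List (List String)) (dir : String) : Prop :=
  3 ≤ up.length ∧ 3 ≤ down.length ∧ 3 ≤ left.length ∧ 3 ≤ right.length ∧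
  3 ≤ front.length ∧ ∀ r ∈ front.take 3, 3 ≤ r.length
instance (up : List (List String)) (down : List (List String)) (front : List (List String)) (left : List (List String)) (right : List (List String)) (dir : String) : Decidable (Pre_change_front up down front left right dir) := by unfold Pre_change_front; infer_instance

def pvWitness_change_front : List (List String) × List (List String) × List (List String) × List (List String) × List (List String) × String :=
  ([["a","b","c"],["d","e","f"],["g","h","i"]],
   [["j","k","l"],["m","n","o"],["p","q","r"]],
   [["1","2","3"],["4","5","6"],["7","8","9"]],
   [["A","B","C"],["D","E","F"],["G","H","I"]],
   [["J","K","L"],["M","N","O"],["P","Q","R"]],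
   "+")

def Spec_change_front (up : List (List String)) (down : List (List String)) (front : List (List String)) (left : List (List String)) (right : List (List String)) (dir : String) (out : List (List String) × List (List String) × List (List String) × List (List String) × List (List String)) : Prop := out = change_front_alt up down front left right dir
instance (up : List (List String)) (down : List (List String)) (front : List (List String)) (left : List (List String)) (right : List (List String)) (dir : String) (out : List (List String) × List (List String) × List (List String) × List (List String) × List (List String)) : Decidable (Spec_change_front up down front left right dir out) := by unfold Spec_change_front; infer_instance

-- ===== CLAIM (what is proved, stated in full; the proofs are below) =====
def Claim_equal_change_front : Prop := ∀ (up : List (List String)) (down : List (List String)) (front : List (List String)) (left : List (List String)) (right : List (List String)) (dir : String), Dom_change_front up down front left right dir → Pre_change_front up down front left right dir → Spec_change_front up down front left right dir (change_front up down front left right dir)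

-- ===== LEMMAS AND PROOFS =====
theorem exists_cons3 {α : Type} {l : List α} (h : 3 ≤ l.length) :
    ∃ a b c t, l = a :: b :: c :: t := by
  match l, h with
  | a :: b :: c :: t, _ => exact ⟨a, b, c, t, rfl⟩

-- ===== VERDICT (by name: the statement is the Claim_ definition above) =====
theorem change_front_spec : Claim_equal_change_front := by
  intro up down front left right dir _ hpre
  obtain ⟨hu, hd, hl, hr, hf, hrows⟩ := hpre
  obtain ⟨u0, u1, u2, ut, rfl⟩ := exists_cons3 hu
  obtain ⟨d0, d1, d2, dt, rfl⟩ := exists_cons3 hd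
  obtain ⟨l0, l1, l2, lt, rfl⟩ := exists_cons3 hl
  obtain ⟨r0, r1, r2, rt, rfl⟩ := exists_cons3 hr
  obtain ⟨f0, f1, f2, ft, rfl⟩ := exists_cons3 hf
  obtain ⟨a0, a1, a2, at_, rfl⟩ := exists_cons3 (hrows f0 (by simp))
  obtain ⟨b0, b1, b2, bt_, rfl⟩ := exists_cons3 (hrows f1 (by simp))
  obtain ⟨c0, c1, c2, ct_, rfl⟩ := exists_cons3 (hrows f2 (by simp))
  unfold Spec_change_front change_front change_front_alt rotate_90
  by_cases h : dir = "-"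
  · subst h; rfl
  · simp only [if_neg h]; rfl
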